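-- pv_equiv track=rewrite | github.com/Toasterhead/small-programs | Sudoku/sudoku.py | get_unmarked
-- ===== SOURCE A (Python) =====
-- def get_unmarked(nonet):
--
--     marked  = [False for i in range(10)]
--     found   = False
--
--     for i in range(1, 10):
--         found = False
--         for row in nonet:
--             for space in row:
--                 if i == space:
--                     marked[i] = True
--                     found = True
--                     break
--             if found: break
--
--     return [i for i in range(1, 10) if not marked[i]]
-- ===== SOURCE B (Python) =====
-- def get_unmarked(nonet):
--     present = {space for row in nonet for space in row}
--     return [i for i in range(1, 10) if i not in present]
-- ===== Notes on version B (the rewrite author's own statement) =====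
-- stated objective: simpler
-- what changed: Replaces the per-digit rescan of the whole nonet (and the marked/found bookkeeping) with a single set-build over the nonet followed by one membership pass over 1-9.
import Mathlib
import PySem

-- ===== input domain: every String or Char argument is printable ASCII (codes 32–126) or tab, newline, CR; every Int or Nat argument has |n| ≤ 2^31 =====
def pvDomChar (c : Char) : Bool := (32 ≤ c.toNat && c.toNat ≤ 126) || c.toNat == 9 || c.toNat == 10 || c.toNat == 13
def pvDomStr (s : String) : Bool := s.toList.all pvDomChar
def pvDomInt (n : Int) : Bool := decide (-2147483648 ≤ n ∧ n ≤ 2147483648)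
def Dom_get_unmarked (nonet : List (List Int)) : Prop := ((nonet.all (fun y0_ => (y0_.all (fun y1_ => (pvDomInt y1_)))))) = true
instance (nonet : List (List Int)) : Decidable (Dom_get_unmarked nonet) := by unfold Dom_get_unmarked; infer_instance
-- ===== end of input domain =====

-- B builds the set of present values once and makes one membership pass over 1..9,
-- instead of A's per-digit rescan of the whole nonet with marked/found bookkeeping.

-- ===== PORT A =====
-- inner 'for space in row: if i == space: … break' — returns whether i was found in the row
def pvInnerRow (i : Int) : List Int → Bool
  | [] => false
  | s :: rest => if i == s then true else pvInnerRow i rest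

-- 'for row in nonet: … if found: break'
def pvScanRows (i : Int) : List (List Int) → Bool
  | [] => false
  | row :: rest => if pvInnerRow i row then true else pvScanRows i rest

def get_unmarked (nonet : List (List Int)) : List Int :=
  let marked0 := (PySem.List.pyRange 0 10 1).map (fun _ => false)
  -- for i in range(1,10): scan nonet; on a hit set marked[i] = True (i is in [1,9], in range)
  let marked := (PySem.List.pyRange 1 10 1).foldl
    (fun m i => if pvScanRows i nonet then PySem.List.pySetD m i true else m) marked0
  (PySem.List.pyRange 1 10 1).filter (fun i => ! PySem.List.pyGetD marked i false)

-- ===== PORT B =====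
def get_unmarked_alt (nonet : List (List Int)) : List Int :=
  let present : PySem.Set Int := PySem.Set.ofList (nonet.flatMap (fun row => row))
  (PySem.List.pyRange 1 10 1).filter (fun i => ! PySem.Set.contains present i)

-- ===== PRECONDITION & SPEC =====
def Spec_get_unmarked (nonet : List (List Int)) (out : List Int) : Prop := out = get_unmarked_alt nonet
instance (nonet : List (List Int)) (out : List Int) : Decidable (Spec_get_unmarked nonet out) := by unfold Spec_get_unmarked; infer_instance

-- ===== CLAIM (what is proved, stated in full; the proofs are below) =====
def Claim_equal_get_unmarked : Prop := ∀ (nonet : List (List Int)), Dom_get_unmarked nonet → Spec_get_unmarked nonet (get_unmarked nonet)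

-- ===== LEMMAS AND PROOFS =====

-- the inner-row scan is just membership
theorem pvInnerRow_eq_mem (i : Int) (row : List Int) :
    pvInnerRow i row = decide (i ∈ row) := by
  induction row with
  | nil => simp [pvInnerRow]
  | cons s rest ih =>
    by_cases h : i = s <;> simp [pvInnerRow, h, ih]

-- the whole scan is membership in the flattened nonet
theorem pvScanRows_eq_mem (i : Int) (rows : List (List Int)) :
    pvScanRows i rows = decide (i ∈ rows.flatMap (fun row => row)) := by
  induction rows with
  | nil => simp [pvScanRows]
  | cons row rest ih =>
    by_cases h : i ∈ row <;> simp [pvScanRows, pvInnerRow_eq_mem, h, ih]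

-- the marking fold never touches an index not in the remaining loop indices
theorem pvFold_preserve (nonet : List (List Int)) (t : List Int) (m : List Bool) (i : Int)
    (hi : 0 ≤ i) (hni : i ∉ t) (ht : ∀ j ∈ t, 0 ≤ j) :
    PySem.List.pyGetD
      (t.foldl (fun m k => if pvScanRows k nonet then PySem.List.pySetD m k true else m) m) i false
      = PySem.List.pyGetD m i false := by
  induction t generalizing m with
  | nil => rfl
  | cons k t' ih =>
    have hk : 0 ≤ k := ht k (by simp)
    have hne : i ≠ k := fun h => hni (h ▸ List.mem_cons_self)
    have hstep : ∀ m' : List Bool,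
        PySem.List.pyGetD (if pvScanRows k nonet then PySem.List.pySetD m' k true else m') i false
          = PySem.List.pyGetD m' i false := by
      intro m'
      split
      · rw [PySem.List.pySetD_of_nonneg m' true hk,
            PySem.List.pyGetD_of_nonneg _ false hi, PySem.List.pyGetD_of_nonneg _ false hi]
        have : i.toNat ≠ k.toNat := by omega
        simp [List.getD, List.getElem?_set_ne (Ne.symm this)]
      · rfl
    simp only [List.foldl_cons]
    rw [ih _ (fun h => hni (List.mem_cons_of_mem _ h)) (fun j hj => ht j (List.mem_cons_of_mem _ hj)),
        hstep]

-- after the fold, marked[i] records exactly whether the scan found i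
theorem pvFold_value (nonet : List (List Int)) (l : List Int) (m : List Bool)
    (hnd : l.Nodup)
    (h : ∀ j ∈ l, 0 ≤ j ∧ j.toNat < m.length ∧ m.getD j.toNat false = false) :
    ∀ i ∈ l, PySem.List.pyGetD
      (l.foldl (fun m k => if pvScanRows k nonet then PySem.List.pySetD m k true else m) m) i false
      = pvScanRows i nonet := by
  induction l generalizing m with
  | nil => intro i hi; simp at hi
  | cons k t ih =>
    intro i hi
    obtain ⟨hk0, hklen, hkval⟩ := h k (by simp)
    have hknt : k ∉ t := (List.nodup_cons.mp hnd).1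
    simp only [List.foldl_cons]
    rcases List.mem_cons.mp hi with rfl | hit
    · -- i = k : later steps don't touch index k
      rw [pvFold_preserve nonet t _ i hk0 hknt (fun j hj => (h j (List.mem_cons_of_mem _ hj)).1)]
      split
      · rw [PySem.List.pySetD_of_nonneg m true hk0, PySem.List.pyGetD_of_nonneg _ false hk0]
        simp only [List.getD, List.getElem?_set_self, hklen, Option.getD_some]
        exact (by assumption : pvScanRows i nonet = true).symm
      · rw [PySem.List.pyGetD_of_nonneg _ false hk0, hkval]
        simp_all
    · -- i ∈ t : apply the IH to the updated array
      apply ih _ (List.nodup_cons.mp hnd).2 _ i hit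
      intro j hj
      obtain ⟨hj0, hjlen, hjval⟩ := h j (List.mem_cons_of_mem _ hj)
      split
      · rw [PySem.List.pySetD_of_nonneg m true hk0]
        refine ⟨hj0, by simpa using hjlen, ?_⟩
        have hne : j.toNat ≠ k.toNat := by
          have : j ≠ k := fun h' => hknt (h' ▸ hj)
          omega
        simpa [List.getD, List.getElem?_set_ne (Ne.symm hne)] using hjval
      · exact ⟨hj0, hjlen, hjval⟩

-- ===== VERDICT (by name: the statement is the Claim_ definition above) =====
theorem get_unmarked_spec : Claim_equal_get_unmarked := by
  intro nonet _
  unfold Spec_get_unmarked get_unmarked get_unmarked_alt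
  refine List.filter_congr ?_
  intro i hi
  have hmem : 1 ≤ i ∧ i < 10 := (PySem.List.mem_pyRange_one).mp hi
  have hm0 : (PySem.List.pyRange 0 10 1).map (fun _ => false) = List.replicate 10 false := by decide
  rw [hm0]
  rw [pvFold_value nonet _ _ (PySem.List.nodup_pyRange_one 1 10)
    (fun j hj => by
      have := (PySem.List.mem_pyRange_one).mp hj
      refine ⟨by omega, by simp; omega, ?_⟩
      have hlt : j.toNat < 10 := by omega
      simp only [List.getD, List.getElem?_replicate]
      simp [hlt]) i hi]
  rw [pvScanRows_eq_mem]
  congr 1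
  simp [PySem.Set.contains, PySem.Set.mem_ofList]
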